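-- pv_equiv track=rewrite | github.com/woggle/training-scripts | assign_passwords_from_log.py | assign_machines
-- ===== SOURCE A (Python) =====
-- def assign_machines(password_list, student_list):
--     result = []
--     for i in range(max(len(password_list), len(student_list))):
--         machine = None
--         password = None
--         email = None
--         name = None
--         if len(password_list) > i:
--             machine = password_list[i][0]
--             password = password_list[i][1]
--         if len(student_list) > i:
--             email = student_list[i][0]
--             name = student_list[i][1]
--         result.append((machine, password, email, name))
--     return result
-- ===== SOURCE B (Python) =====
-- def assign_machines(password_list, student_list):
--     k = min(len(password_list), len(student_list))
--     head = [(p[0], p[1], s[0], s[1]) for p, s in zip(password_list, student_list)]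
--     extra_p = [(p[0], p[1], None, None) for p in password_list[k:]]
--     extra_s = [(None, None, s[0], s[1]) for s in student_list[k:]]
--     return head + extra_p + extra_s
-- ===== Notes on version B (the rewrite author's own statement) =====
-- stated objective: alternative
-- what changed: Replaces the single index loop with two length guards by a staged construction: truncating zip of the common prefix, then the leftover tail of whichever list is longer mapped and concatenated (no padding, no per-index guards).
import Mathlib
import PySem

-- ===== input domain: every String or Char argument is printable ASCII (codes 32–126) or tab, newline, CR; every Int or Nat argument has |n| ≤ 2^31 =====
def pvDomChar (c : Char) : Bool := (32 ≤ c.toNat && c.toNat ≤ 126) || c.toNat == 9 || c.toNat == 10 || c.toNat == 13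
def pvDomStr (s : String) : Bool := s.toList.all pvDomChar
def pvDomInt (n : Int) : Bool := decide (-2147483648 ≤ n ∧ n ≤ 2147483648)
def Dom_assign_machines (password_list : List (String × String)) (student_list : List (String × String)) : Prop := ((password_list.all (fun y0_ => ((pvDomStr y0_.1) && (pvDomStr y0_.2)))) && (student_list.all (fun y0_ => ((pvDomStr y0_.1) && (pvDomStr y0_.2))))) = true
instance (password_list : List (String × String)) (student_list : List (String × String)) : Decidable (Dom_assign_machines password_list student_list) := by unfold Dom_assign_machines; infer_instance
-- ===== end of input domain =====

-- B replaces A's guarded index loop by a staged construction: a truncating zip of the common prefix followed by the leftover tail mapped and appended (alternative decomposition; same cost).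


-- ===== PORT A =====
def assign_machines (password_list : List (String × String)) (student_list : List (String × String)) : List (Option String × Option String × Option String × Option String) :=
  (List.range (max password_list.length student_list.length)).foldl
    (fun result i =>
      let machine : Option String := if h : password_list.length > i then some (password_list[i].1) else none
      let password : Option String := if h : password_list.length > i then some (password_list[i].2) else none
      let email : Option String := if h : student_list.length > i then some (student_list[i].1) else none
      let name : Option String := if h : student_list.length > i then some (student_list[i].2) else none
      result ++ [(machine, password, email, name)]) []

-- ===== PORT B =====
-- B: truncating zip of the common prefix, then the leftover tails (at most one nonempty) mapped and concatenated.
def assign_machines_alt (password_list : List (String × String)) (student_list : List (String × String)) : List (Option String × Option String × Option String × Option String) :=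
  let k := min password_list.length student_list.length
  ((password_list.zip student_list).map (fun ps => (some ps.1.1, some ps.1.2, some ps.2.1, some ps.2.2)))
  ++ ((password_list.drop k).map (fun p => (some p.1, some p.2, none, none)))
  ++ ((student_list.drop k).map (fun s => (none, none, some s.1, some s.2)))

-- ===== PRECONDITION & SPEC =====
def Spec_assign_machines (password_list : List (String × String)) (student_list : List (String × String)) (out : List (Option String × Option String × Option String × Option String)) : Prop := out = assign_machines_alt password_list student_list
instance (password_list : List (String × String)) (student_list : List (String × String)) (out : List (Option String × Option String × Option String × Option String)) : Decidable (Spec_assign_machines password_list student_list out) := by unfold Spec_assign_machines; infer_instance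

-- ===== CLAIM =====
def Claim_equal_assign_machines : Prop := ∀ (password_list : List (String × String)) (student_list : List (String × String)), Dom_assign_machines password_list student_list → Spec_assign_machines password_list student_list (assign_machines password_list student_list)

-- ===== LEMMAS AND PROOFS =====
-- the row A builds at index i, written with getElem?
def pvRow (pl sl : List (String × String)) (i : Nat) :
    Option String × Option String × Option String × Option String :=
  (pl[i]?.map Prod.fst, pl[i]?.map Prod.snd, sl[i]?.map Prod.fst, sl[i]?.map Prod.snd)

theorem pvFoldlAppend {α β : Type} (g : α → β) (l : List α) (init : List β) :
    l.foldl (fun r i => r ++ [g i]) init = init ++ l.map g := by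
  induction l generalizing init with
  | nil => simp
  | cons a t ih => simp [List.foldl, ih]

theorem pvAlt_nil_right (pl : List (String × String)) :
    assign_machines_alt pl [] = pl.map (fun p => (some p.1, some p.2, none, none)) := by
  simp [assign_machines_alt]

theorem pvAlt_nil_left (sl : List (String × String)) :
    assign_machines_alt [] sl = sl.map (fun s => (none, none, some s.1, some s.2)) := by
  simp [assign_machines_alt]

theorem pvAlt_cons_cons (p s : String × String) (ps ss : List (String × String)) :
    assign_machines_alt (p :: ps) (s :: ss)
      = (some p.1, some p.2, some s.1, some s.2) :: assign_machines_alt ps ss := by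
  simp [assign_machines_alt, Nat.succ_min_succ, List.drop_succ_cons]

theorem pvRow_succ (p s : String × String) (ps ss : List (String × String)) (i : Nat) :
    pvRow (p :: ps) (s :: ss) (i + 1) = pvRow ps ss i := by
  simp [pvRow]

theorem pvRow_succ_left (p : String × String) (ps : List (String × String)) (i : Nat) :
    pvRow (p :: ps) [] (i + 1) = pvRow ps [] i := by
  simp [pvRow]

theorem pvRow_succ_right (s : String × String) (ss : List (String × String)) (i : Nat) :
    pvRow [] (s :: ss) (i + 1) = pvRow [] ss i := by
  simp [pvRow]

theorem pvMapRange (pl sl : List (String × String)) :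
    (List.range (max pl.length sl.length)).map (pvRow pl sl) = assign_machines_alt pl sl := by
  induction pl generalizing sl with
  | nil =>
    induction sl with
    | nil => simp [assign_machines_alt]
    | cons s ss ihs =>
      have h1 : max (List.length ([] : List (String × String))) (s :: ss).length
          = ss.length + 1 := by simp
      rw [h1, List.range_succ_eq_map, List.map_cons, List.map_map, pvAlt_nil_left,
          List.map_cons]
      refine congrArg₂ List.cons (by simp [pvRow]) ?_
      rw [← pvAlt_nil_left, ← ihs]
      simp only [List.length_nil, Nat.max_eq_right (Nat.zero_le _)]
      exact List.map_congr_left fun i _ => pvRow_succ_right s ss i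
  | cons p ps ih =>
    cases sl with
    | nil =>
      have h1 : max (p :: ps).length (List.length ([] : List (String × String)))
          = ps.length + 1 := by simp
      rw [h1, List.range_succ_eq_map, List.map_cons, List.map_map, pvAlt_nil_right,
          List.map_cons]
      refine congrArg₂ List.cons (by simp [pvRow]) ?_
      rw [← pvAlt_nil_right, ← ih []]
      simp only [List.length_nil, Nat.max_eq_left (Nat.zero_le _)]
      exact List.map_congr_left fun i _ => pvRow_succ_left p ps i
    | cons s ss =>
      have h1 : max (p :: ps).length (s :: ss).length = max ps.length ss.length + 1 := by
        simp [Nat.succ_max_succ]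
      rw [h1, List.range_succ_eq_map, List.map_cons, List.map_map, pvAlt_cons_cons]
      refine congrArg₂ List.cons (by simp [pvRow]) ?_
      rw [← ih ss]
      exact List.map_congr_left fun i _ => pvRow_succ p s ps ss i

theorem pvA_eq_map (pl sl : List (String × String)) :
    assign_machines pl sl = (List.range (max pl.length sl.length)).map (pvRow pl sl) := by
  unfold assign_machines
  have hfun : (fun (result : List (Option String × Option String × Option String × Option String)) (i : Nat) =>
      let machine : Option String := if h : pl.length > i then some (pl[i].1) else none
      let password : Option String := if h : pl.length > i then some (pl[i].2) else none
      let email : Option String := if h : sl.length > i then some (sl[i].1) else none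
      let name : Option String := if h : sl.length > i then some (sl[i].2) else none
      result ++ [(machine, password, email, name)])
      = fun result i => result ++ [pvRow pl sl i] := by
    funext result i
    simp only [pvRow, gt_iff_lt]
    split_ifs <;> simp_all
  rw [hfun, pvFoldlAppend (pvRow pl sl)]
  simp

-- ===== VERDICT =====
theorem assign_machines_spec : Claim_equal_assign_machines := by
  intro pl sl _
  unfold Spec_assign_machines
  rw [pvA_eq_map, pvMapRange]
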